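-- pv_equiv track=rewrite | github.com/Fraunhofer-FIT-DSAI/SASP | SASP/sasp/automation_component/stix_parsing.py | unencode
-- ===== SOURCE A (Python) =====
-- def unencode(s):
--     escaped = False
--     result = ""
--     for c in s:
--         if escaped:
--             result += c
--             escaped = False
--         elif c == "\\":
--             escaped = True
--         elif c == "_":
--             result += " "
--         else:
--             result += c
--     return result
-- ===== SOURCE B (Python) =====
-- import re
--
-- def unencode(s):
--     return re.sub(r'\\(.?)|_',
--                   lambda m: m.group(1) if m.group(1) is not None else ' ',
--                   s)
-- ===== Notes on version B (the rewrite author's own statement) =====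
-- stated objective: idiomatic
-- what changed: Replaced the explicit character loop with an escaped flag by a single re.sub over the pattern \\(.?)|_ with a replacement callback; the C regex engine does the one-pass scan instead of per-character Python bytecode and string concatenation.
import Mathlib
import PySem

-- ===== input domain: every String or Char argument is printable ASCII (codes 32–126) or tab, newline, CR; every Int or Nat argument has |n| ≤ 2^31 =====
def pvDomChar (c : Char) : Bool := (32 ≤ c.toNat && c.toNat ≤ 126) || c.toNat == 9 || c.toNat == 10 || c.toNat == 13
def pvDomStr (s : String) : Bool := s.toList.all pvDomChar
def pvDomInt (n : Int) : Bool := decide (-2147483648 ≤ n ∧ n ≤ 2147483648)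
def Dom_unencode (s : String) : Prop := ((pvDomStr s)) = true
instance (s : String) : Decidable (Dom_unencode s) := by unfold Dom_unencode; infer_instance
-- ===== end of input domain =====

-- B replaces A's explicit escaped-flag character loop by one regex substitution (re.sub with a callback); same return value on every string.


-- ===== PORT A =====
-- literal port: fold over the characters with state (escaped flag, accumulated result)
def unencode (s : String) : String :=
  let st := s.toList.foldl (fun (p : Bool × List Char) c =>
    if p.1 then (false, p.2 ++ [c])
    else if c = '\\' then (true, p.2)
    else if c = '_' then (false, p.2 ++ [' '])
    else (false, p.2 ++ [c])) (false, ([] : List Char))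
  String.mk st.2

-- ===== PORT B =====
-- port of re.sub(r'\\(.?)|_', repl, s): the regex engine's left-to-right scan; at each
-- position the alternative '\\(.?)' (backslash plus optional any char, callback emits the
-- group) is tried first, then '_' (callback emits ' '), otherwise the char is copied.
def unencodeSubScan : List Char → List Char
  | [] => []
  | '\\' :: rest =>
    match rest with
    | [] => []                       -- group (.?) matched empty: callback returns ''
    | c :: rest' => c :: unencodeSubScan rest'
  | '_' :: rest => ' ' :: unencodeSubScan rest
  | c :: rest => c :: unencodeSubScan rest

def unencode_alt (s : String) : String := String.mk (unencodeSubScan s.toList)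

-- ===== PRECONDITION & SPEC =====
def Spec_unencode (s : String) (out : String) : Prop := out = unencode_alt s
instance (s : String) (out : String) : Decidable (Spec_unencode s out) := by unfold Spec_unencode; infer_instance

-- ===== CLAIM (what is proved, stated in full; the proofs are below) =====
def Claim_equal_unencode : Prop := ∀ (s : String), Dom_unencode s → Spec_unencode s (unencode s)

-- ===== LEMMAS AND PROOFS =====
lemma unencode_fold_eq (l : List Char) : ∀ acc : List Char,
    (l.foldl (fun (p : Bool × List Char) c =>
      if p.1 then (false, p.2 ++ [c])
      else if c = '\\' then (true, p.2)
      else if c = '_' then (false, p.2 ++ [' '])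
      else (false, p.2 ++ [c])) (false, acc)).2 = acc ++ unencodeSubScan l := by
  induction l using unencodeSubScan.induct with
  | case1 => intro acc; simp [unencodeSubScan]
  | case2 => intro acc; simp [unencodeSubScan, List.foldl]
  | case3 c rest' ih =>
    intro acc
    simp only [List.foldl, unencodeSubScan, Bool.false_eq_true, if_false, reduceIte, Char.reduceEq]
    rw [ih]; simp
  | case4 rest ih =>
    intro acc
    simp only [List.foldl, unencodeSubScan, Bool.false_eq_true, if_false, reduceIte, Char.reduceEq]
    rw [ih]; simp
  | case5 c rest h1 h2 ih =>
    intro acc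
    simp only [List.foldl, unencodeSubScan, if_neg h1, if_neg h2, Bool.false_eq_true, if_false, reduceIte, Char.reduceEq]
    rw [ih]; simp

-- ===== VERDICT (by name: the statement is the Claim_ definition above) =====
theorem unencode_spec : Claim_equal_unencode := by
  intro s _
  unfold Spec_unencode unencode unencode_alt
  simp only []
  rw [unencode_fold_eq s.toList []]
  simp
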